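-- pv_equiv track=rewrite | github.com/WRMELO/PortfolioZero | scripts/agno_runner.py | allowlist_ok
-- ===== SOURCE A (Python) =====
-- def allowlist_ok(changed: list[str], allowlist: list[str]) -> bool:
--     def allowed(path: str) -> bool:
--         for a in allowlist:
--             if a.endswith("/") and path.startswith(a):
--                 return True
--             if path == a:
--                 return True
--         return False
--
--     return all(allowed(p) for p in changed)
-- ===== SOURCE B (Python) =====
-- def allowlist_ok(changed: list[str], allowlist: list[str]) -> bool:
--     # Inverted traversal: start from the set of unmatched changed paths and
--     # let each allowlist entry eliminate the paths it covers; ok iff none remain.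
--     remaining = set(changed)
--     for a in allowlist:
--         if a.endswith("/"):
--             remaining = {p for p in remaining if not p.startswith(a)}
--         else:
--             remaining.discard(a)
--     return not remaining
-- ===== Notes on version B (the rewrite author's own statement) =====
-- stated objective: alternative
-- what changed: B inverts the loop nesting: instead of testing each changed path against the whole allowlist, it starts from the set of all changed paths and folds over the allowlist, each entry removing the paths it covers (discard for exact entries, a filter for '/'-prefix entries), returning True iff the remaining set is empty.
import Mathlib
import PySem

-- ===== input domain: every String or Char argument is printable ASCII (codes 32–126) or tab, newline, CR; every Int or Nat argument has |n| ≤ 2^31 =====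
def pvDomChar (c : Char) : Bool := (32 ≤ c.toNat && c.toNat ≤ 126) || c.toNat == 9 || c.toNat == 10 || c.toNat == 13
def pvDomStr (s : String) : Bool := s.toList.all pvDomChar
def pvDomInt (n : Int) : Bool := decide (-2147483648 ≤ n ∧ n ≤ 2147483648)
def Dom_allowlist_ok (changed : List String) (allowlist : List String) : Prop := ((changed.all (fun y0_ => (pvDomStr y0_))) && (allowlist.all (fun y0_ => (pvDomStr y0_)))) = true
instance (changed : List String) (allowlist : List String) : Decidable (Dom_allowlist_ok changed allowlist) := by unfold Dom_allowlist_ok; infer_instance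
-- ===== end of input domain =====

-- B inverts the loop nesting: it folds over the allowlist, each entry removing the changed
-- paths it covers from a remaining-set, and returns True iff nothing remains.


-- ===== PORT A =====
-- inner 'allowed': for a in allowlist: two early-return branches, else False
def pvAllowedA (allowlist : List String) (path : String) : Bool :=
  match allowlist with
  | [] => false
  | a :: rest =>
    if PySem.Str.endswith a "/" && PySem.Str.startswith path a then true
    else if path == a then true
    else pvAllowedA rest path

def allowlist_ok (changed : List String) (allowlist : List String) : Bool :=
  changed.all (fun p => pvAllowedA allowlist p)

-- ===== PORT B =====
-- loop body: one allowlist entry removes the paths it covers from the remaining set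
def pvStep (rem : PySem.Set String) (a : String) : PySem.Set String :=
  if PySem.Str.endswith a "/" then rem.filter (fun p => !PySem.Str.startswith p a)
  else PySem.Set.discard rem a

def allowlist_ok_alt (changed : List String) (allowlist : List String) : Bool :=
  (allowlist.foldl pvStep (PySem.Set.ofList changed)).isEmpty

-- ===== PRECONDITION & SPEC =====
def Spec_allowlist_ok (changed : List String) (allowlist : List String) (out : Bool) : Prop := out = allowlist_ok_alt changed allowlist
instance (changed : List String) (allowlist : List String) (out : Bool) : Decidable (Spec_allowlist_ok changed allowlist out) := by unfold Spec_allowlist_ok; infer_instance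

-- ===== CLAIM (what is proved, stated in full; the proofs are below) =====
def Claim_equal_allowlist_ok : Prop := ∀ (changed : List String) (allowlist : List String), Dom_allowlist_ok changed allowlist → Spec_allowlist_ok changed allowlist (allowlist_ok changed allowlist)

-- ===== LEMMAS AND PROOFS =====

theorem pv_startswith_self (s : String) : PySem.Str.startswith s s = true := by
  simp [PySem.Str.startswith_eq, PySem.Chars.startswith_iff]

-- A's inner scan characterised
theorem pvAllowedA_iff (allowlist : List String) (path : String) :
    pvAllowedA allowlist path = true ↔
      ∃ a ∈ allowlist,
        (PySem.Str.endswith a "/" = true ∧ PySem.Str.startswith path a = true) ∨ path = a := by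
  induction allowlist with
  | nil => simp [pvAllowedA]
  | cons a rest ih =>
    by_cases h1 : (PySem.Str.endswith a "/" && PySem.Str.startswith path a) = true
    · rw [pvAllowedA, if_pos h1]
      constructor
      · intro _
        exact ⟨a, List.mem_cons_self .., Or.inl ⟨((Bool.and_eq_true _ _).mp h1).1,
          ((Bool.and_eq_true _ _).mp h1).2⟩⟩
      · intro _; rfl
    · rw [pvAllowedA, if_neg h1]
      by_cases h2 : (path == a) = true
      · rw [if_pos h2]
        constructor
        · intro _
          exact ⟨a, List.mem_cons_self .., Or.inr (by simpa using h2)⟩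
        · intro _; rfl
      · rw [if_neg h2, ih]
        constructor
        · rintro ⟨b, hb, hc⟩; exact ⟨b, List.mem_cons_of_mem _ hb, hc⟩
        · rintro ⟨b, hb, hc⟩
          rcases List.mem_cons.mp hb with rfl | hb'
          · rcases hc with ⟨he, hs⟩ | rfl
            · exact absurd ((Bool.and_eq_true _ _).mpr ⟨he, hs⟩) h1
            · exact absurd (by simp) h2
          · exact ⟨b, hb', hc⟩

-- one step of B removes exactly the paths the entry covers
theorem mem_pvStep (rem : PySem.Set String) (a p : String) :
    p ∈ pvStep rem a ↔
      p ∈ rem ∧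
        ¬ ((PySem.Str.endswith a "/" = true ∧ PySem.Str.startswith p a = true) ∨ p = a) := by
  unfold pvStep
  by_cases he : PySem.Str.endswith a "/" = true
  · rw [if_pos he]
    simp only [List.mem_filter, Bool.not_eq_true']
    constructor
    · rintro ⟨hm, hs⟩
      refine ⟨hm, ?_⟩
      rintro (⟨_, hs'⟩ | rfl)
      · exact absurd (hs'.symm.trans hs) (by decide)
      · exact absurd ((pv_startswith_self p).symm.trans hs) (by decide)
    · rintro ⟨hm, hn⟩
      refine ⟨hm, ?_⟩
      by_contra h
      exact hn (Or.inl ⟨he, by simpa using h⟩)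
  · rw [if_neg he]
    rw [PySem.Set.mem_discard]
    constructor
    · rintro ⟨hm, hne⟩
      exact ⟨hm, by rintro (⟨he', _⟩ | rfl) <;> [exact he he'; exact hne rfl]⟩
    · rintro ⟨hm, hn⟩
      exact ⟨hm, fun hEq => hn (Or.inr hEq)⟩

-- B's fold: what remains are the paths matched by no allowlist entry
theorem mem_foldl_pvStep (allowlist : List String) (rem : PySem.Set String) (p : String) :
    p ∈ allowlist.foldl pvStep rem ↔ p ∈ rem ∧ pvAllowedA allowlist p = false := by
  induction allowlist generalizing rem with
  | nil => simp [pvAllowedA]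
  | cons a rest ih =>
    rw [List.foldl_cons, ih, mem_pvStep]
    constructor
    · rintro ⟨⟨hm, hn⟩, hrest⟩
      refine ⟨hm, ?_⟩
      rw [Bool.eq_false_iff, Ne, pvAllowedA_iff]
      rintro ⟨b, hb, hc⟩
      rcases List.mem_cons.mp hb with rfl | hb'
      · exact hn hc
      · exact absurd (pvAllowedA_iff rest p |>.mpr ⟨b, hb', hc⟩) (by simp [hrest])
    · rintro ⟨hm, hfalse⟩
      have hn : ¬ ∃ b ∈ a :: rest,
          (PySem.Str.endswith b "/" = true ∧ PySem.Str.startswith p b = true) ∨ p = b := by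
        rw [← pvAllowedA_iff]; simp [hfalse]
      constructor
      · exact ⟨hm, fun h => hn ⟨a, List.mem_cons_self .., h⟩⟩
      · rw [Bool.eq_false_iff, Ne, pvAllowedA_iff]
        rintro ⟨b, hb, hc⟩
        exact hn ⟨b, List.mem_cons_of_mem _ hb, hc⟩

-- ===== VERDICT (by name: the statement is the Claim_ definition above) =====
theorem allowlist_ok_spec : Claim_equal_allowlist_ok := by
  intro changed allowlist _
  unfold Spec_allowlist_ok allowlist_ok allowlist_ok_alt
  rw [Bool.eq_iff_iff, List.all_eq_true, List.isEmpty_iff, List.eq_nil_iff_forall_not_mem]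
  constructor
  · intro hall p hp
    rw [mem_foldl_pvStep] at hp
    rcases hp with ⟨hm, hf⟩
    have := hall p (by simpa [PySem.Set.mem_ofList] using hm)
    simp [this] at hf
  · intro hempty p hp
    by_contra h
    exact hempty p ((mem_foldl_pvStep allowlist _ p).mpr
      ⟨by simpa [PySem.Set.mem_ofList] using hp, by simpa using h⟩)
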